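-- pv_equiv track=rewrite | github.com/tim-fu/coding-problems | epic_alarm_keypad.py | is_valid_alarm_code
-- ===== SOURCE A (Python) =====
-- def is_valid_alarm_code(expected_code, entered_code):
--     """Check if entered code is valid - one digit on the alarm keypad may not be working"""
--     expected = str(expected_code)
--     entered = str(entered_code)
--
--     if entered == expected:
--         return True
--
--     unique_digits = set(expected)
--
--     # Remove all occurrences of each digit and see if entered code matches
--     for digit_to_remove in unique_digits:
--         modified_code = expected.replace(digit_to_remove, "")
--
--         if entered == modified_code:
--             return True
--
--     return False
-- ===== SOURCE B (Python) =====
-- def is_valid_alarm_code(expected_code, entered_code):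
--     """Check if entered code is valid - one digit on the alarm keypad may not be working"""
--     expected = str(expected_code)
--     entered = str(entered_code)
--
--     if entered == expected:
--         return True
--
--     # Find the length of the common prefix: the removed digit, if any,
--     # must be the expected character at the first point of divergence.
--     i = 0
--     while i < len(entered) and i < len(expected) and entered[i] == expected[i]:
--         i += 1
--
--     if i >= len(expected):
--         return False
--
--     candidate = expected[i]
--     return entered == expected.replace(candidate, "")
-- ===== Notes on version B (the rewrite author's own statement) =====
-- stated objective: alternative
-- what changed: Instead of trying every distinct digit of the expected code, B computes the single possible removed digit as the expected character at the first point of divergence and does one replace-and-compare check.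
import Mathlib
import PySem

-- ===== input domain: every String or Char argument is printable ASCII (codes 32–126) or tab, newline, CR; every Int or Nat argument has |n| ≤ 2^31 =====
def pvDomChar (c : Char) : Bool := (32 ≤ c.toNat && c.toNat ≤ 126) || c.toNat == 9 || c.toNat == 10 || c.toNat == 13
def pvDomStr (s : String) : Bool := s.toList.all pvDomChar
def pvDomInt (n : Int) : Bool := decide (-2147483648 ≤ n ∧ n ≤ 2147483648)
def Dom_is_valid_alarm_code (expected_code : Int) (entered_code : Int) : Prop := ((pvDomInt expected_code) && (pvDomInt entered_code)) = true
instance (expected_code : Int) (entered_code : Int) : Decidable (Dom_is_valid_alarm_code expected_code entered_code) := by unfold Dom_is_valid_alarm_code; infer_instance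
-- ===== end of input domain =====

-- B replaces A's loop over every distinct digit by computing the single possible
-- removed digit (the expected char at the first divergence) and one replace-and-compare.


-- ===== PORT A =====
def is_valid_alarm_code (expected_code : Int) (entered_code : Int) : Bool :=
  let expected := PySem.Int.toChars expected_code
  let entered := PySem.Int.toChars entered_code
  if entered == expected then true
  else
    let unique_digits := PySem.Set.ofList expected
    -- for-loop with early 'return True' over a set: an order-independent existential
    unique_digits.any (fun digit_to_remove =>
      let modified_code := PySem.Chars.replace expected [digit_to_remove] []
      entered == modified_code)

-- ===== PORT B =====
-- common-prefix length (Source B's while loop)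
def pvFirstDiff : List Char → List Char → Nat
  | a :: as, b :: bs => if a == b then pvFirstDiff as bs + 1 else 0
  | _, _ => 0

def is_valid_alarm_code_alt (expected_code : Int) (entered_code : Int) : Bool :=
  let expected := PySem.Int.toChars expected_code
  let entered := PySem.Int.toChars entered_code
  if entered == expected then true
  else
    let i := pvFirstDiff expected entered
    match expected.drop i with           -- [] ↔ i ≥ len(expected)
    | [] => false
    | candidate :: _ => entered == PySem.Chars.replace expected [candidate] []

-- ===== PRECONDITION & SPEC =====
def Spec_is_valid_alarm_code (expected_code : Int) (entered_code : Int) (out : Bool) : Prop := out = is_valid_alarm_code_alt expected_code entered_code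
instance (expected_code : Int) (entered_code : Int) (out : Bool) : Decidable (Spec_is_valid_alarm_code expected_code entered_code out) := by unfold Spec_is_valid_alarm_code; infer_instance

-- ===== CLAIM (what is proved, stated in full; the proofs are below) =====
def Claim_equal_is_valid_alarm_code : Prop := ∀ (expected_code : Int) (entered_code : Int), Dom_is_valid_alarm_code expected_code entered_code → Spec_is_valid_alarm_code expected_code entered_code (is_valid_alarm_code expected_code entered_code)

-- ===== LEMMAS AND PROOFS =====

-- Python's s.replace(c, "") for a single char is a filter
theorem replace_go_filter (c : Char) : ∀ (l : List Char) (fuel : Nat) (acc : List Char),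
    l.length ≤ fuel →
    PySem.Chars.replace.go [c] [] fuel l acc = acc.reverse ++ l.filter (fun x => x != c) := by
  intro l
  induction l with
  | nil =>
    intro fuel acc _
    cases fuel <;> simp [PySem.Chars.replace.go]
  | cons h t ih =>
    intro fuel acc hle
    cases fuel with
    | zero => simp at hle
    | succ f =>
      simp only [PySem.Chars.replace.go, List.isPrefixOf]
      by_cases hc : c = h
      · subst hc
        simp only [BEq.rfl, Bool.true_and, if_pos, List.reverse_nil,
          List.nil_append, List.length_cons, List.length_nil, List.drop_succ_cons, List.drop_zero]
        rw [ih f acc (by simpa using hle)]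
        simp
      · have hbe : (c == h) = false := by simp [hc]
        simp only [hbe, Bool.false_and, if_neg, Bool.false_eq_true, not_false_iff]
        rw [ih f (h :: acc) (by simpa using hle)]
        simp [Ne.symm hc]

theorem replace_single (E : List Char) (c : Char) :
    PySem.Chars.replace E [c] [] = E.filter (fun x => x != c) := by
  rw [PySem.Chars.replace, if_neg (by simp)]
  exact replace_go_filter c E E.length [] le_rfl

-- if removing all occurrences of c changed E into N, then the first divergence of E and N
-- sits exactly at the first occurrence of c in E
theorem firstDiff_head (c : Char) : ∀ (E N : List Char),
    N = E.filter (fun x => x != c) → N ≠ E →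
    (E.drop (pvFirstDiff E N)).head? = some c := by
  intro E
  induction E with
  | nil => intro N hN hne; simp [hN] at hne
  | cons a E' ih =>
    intro N hN hne
    by_cases hc : a = c
    · subst hc
      have hN' : N = E'.filter (fun x => x != a) := by simpa using hN
      cases hNc : N with
      | nil => simp [pvFirstDiff]
      | cons b N' =>
        have hbne : b ≠ a := by
          have hb : b ∈ E'.filter (fun x => x != a) := by rw [← hN', hNc]; simp
          have := List.of_mem_filter hb
          simpa using this
        have : (a == b) = false := by simp [Ne.symm hbne]
        simp [pvFirstDiff, this]
    · have hN' : N = a :: E'.filter (fun x => x != c) := by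
        simpa [hc] using hN
      cases hNc : N with
      | nil => simp [hNc] at hN'
      | cons b N' =>
        rw [hNc] at hN'
        have hba : b = a := (List.cons.injEq _ _ _ _ ▸ hN').1
        have hN'' : N' = E'.filter (fun x => x != c) := (List.cons.injEq _ _ _ _ ▸ hN').2
        have hne' : N' ≠ E' := by
          intro h; apply hne; rw [hNc, hba, h]
        have := ih N' hN'' hne'
        simp [pvFirstDiff, hba, this]

-- ===== VERDICT (by name: the statement is the Claim_ definition above) =====
theorem is_valid_alarm_code_spec : Claim_equal_is_valid_alarm_code := by
  intro e n _
  unfold Spec_is_valid_alarm_code is_valid_alarm_code is_valid_alarm_code_alt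
  set E := PySem.Int.toChars e with hE
  set N := PySem.Int.toChars n with hN
  by_cases heq : N = E
  · simp [heq]
  · have hbeq : (N == E) = false := by simp [heq]
    simp only [hbeq, Bool.false_eq_true, if_neg, not_false_iff]
    rw [Bool.eq_iff_iff]
    constructor
    · intro hA
      rw [List.any_eq_true] at hA
      obtain ⟨d, hdmem, hd⟩ := hA
      simp only [beq_iff_eq] at hd
      rw [replace_single] at hd
      have hhead := firstDiff_head d E N hd heq
      cases hdrop : E.drop (pvFirstDiff E N) with
      | nil => rw [hdrop] at hhead; simp at hhead
      | cons cand rest =>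
        rw [hdrop] at hhead
        simp only [List.head?_cons, Option.some.injEq] at hhead
        subst hhead
        simp [replace_single, hd]
    · intro hB
      cases hdrop : E.drop (pvFirstDiff E N) with
      | nil => rw [hdrop] at hB; simp at hB
      | cons cand rest =>
        rw [hdrop] at hB
        simp only [beq_iff_eq] at hB
        rw [List.any_eq_true]
        refine ⟨cand, ?_, by simp [hB]⟩
        rw [PySem.Set.mem_ofList]
        have : cand ∈ E.drop (pvFirstDiff E N) := by rw [hdrop]; simp
        exact List.drop_subset _ _ this
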